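-- pv_equiv track=rewrite | github.com/algorithm-studyy/algorithm | jiwon/programmers/python/number_game.py | solution
-- ===== SOURCE A (Python) =====
-- from bisect import bisect_right
--
-- def solution(A, B):
--     B.sort()
--     answer = 0
--     for a_num in A:
--         i = bisect_right(B, a_num)
--         if i == len(B):
--             continue
--         elif B[i] > a_num:
--             answer += 1
--             B.pop(i)
--     return answer
-- ===== SOURCE B (Python) =====
-- def solution(A, B):
--     sa = sorted(A)
--     sb = sorted(B)
--     ans = 0
--     i = 0
--     j = 0
--     while i < len(sa) and j < len(sb):
--         if sa[i] < sb[j]: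
--             ans += 1
--             i += 1
--         j += 1
--     return ans
-- ===== Notes on version B (the rewrite author's own statement) =====
-- stated objective: faster
-- what changed: Replaced the per-element bisect-then-pop greedy on a mutable sorted list (each pop is O(n)) by sorting both lists once and counting matches with a single two-pointer sweep.
import Mathlib
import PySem

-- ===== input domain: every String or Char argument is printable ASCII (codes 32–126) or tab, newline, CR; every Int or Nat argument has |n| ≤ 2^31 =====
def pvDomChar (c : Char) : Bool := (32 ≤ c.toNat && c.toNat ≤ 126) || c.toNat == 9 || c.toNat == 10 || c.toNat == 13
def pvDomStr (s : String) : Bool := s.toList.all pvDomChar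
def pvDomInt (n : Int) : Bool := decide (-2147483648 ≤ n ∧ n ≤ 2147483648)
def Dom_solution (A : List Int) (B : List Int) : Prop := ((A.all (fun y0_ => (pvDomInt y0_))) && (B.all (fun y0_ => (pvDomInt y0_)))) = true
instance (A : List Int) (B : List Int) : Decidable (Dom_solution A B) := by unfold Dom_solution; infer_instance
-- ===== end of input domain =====

-- B replaces A's bisect-then-pop greedy by a sort-both + two-pointer sweep (faster: no O(n) pops).
-- Note: Python A sorts and pops the caller's list B in place; B does not mutate its arguments.
-- The equivalence proved here is about the RETURN value only.

-- ===== PORT A =====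
-- one loop iteration of A: i = bisect_right(B, a); if i == len(B): continue; elif B[i] > a: answer += 1; B.pop(i)
def stepA (s : Int × List Int) (a : Int) : Int × List Int :=
  let i := PySem.List.bisectRight s.2 a
  if i = s.2.length then s
  else if a < s.2.getD i 0 then
    match PySem.List.pop? s.2 (i : Int) with
    | some (_, rest) => (s.1 + 1, rest)
    | none => s            -- unreachable totality guard: i < len here
  else s

def solution (A : List Int) (B : List Int) : Int :=
  (A.foldl stepA (0, PySem.List.sorted B (fun x => x))).1

-- ===== PORT B =====
-- the while loop of Source B: two pointers i over sorted A, j over sorted B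
def altLoop (sa sb : List Int) (ans : Int) (i j : Nat) : Int :=
  if h : i < sa.length ∧ j < sb.length then
    if sa[i]'h.1 < sb[j]'h.2 then altLoop sa sb (ans + 1) (i + 1) (j + 1)
    else altLoop sa sb ans i (j + 1)
  else ans
termination_by sb.length - j
decreasing_by all_goals omega

def solution_alt (A : List Int) (B : List Int) : Int :=
  altLoop (PySem.List.sorted A (fun x => x)) (PySem.List.sorted B (fun x => x)) 0 0 0

-- ===== PRECONDITION & SPEC =====
def Spec_solution (A : List Int) (B : List Int) (out : Int) : Prop := out = solution_alt A B
instance (A : List Int) (B : List Int) (out : Int) : Decidable (Spec_solution A B out) := by unfold Spec_solution; infer_instance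

-- ===== CLAIM (what is proved, stated in full; the proofs are below) =====
def Claim_equal_solution : Prop := ∀ (A : List Int) (B : List Int), Dom_solution A B → Spec_solution A B (solution A B)

-- ===== LEMMAS AND PROOFS =====

-- remove the first element strictly greater than a (the element A's bisect+pop removes on a sorted list)
def rfgt (l : List Int) (a : Int) : Option (List Int) :=
  match l with
  | [] => none
  | b :: t => if a < b then some t else (rfgt t a).map (b :: ·)

-- abstract greedy step: A's step on sorted state, stated without bisect/pop
def stepG (s : Int × List Int) (a : Int) : Int × List Int :=
  match rfgt s.2 a with
  | none => s
  | some t => (s.1 + 1, t)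

theorem rfgt_none_iff (l : List Int) (a : Int) : rfgt l a = none ↔ ∀ b ∈ l, b ≤ a := by
  induction l with
  | nil => simp [rfgt]
  | cons b t ih =>
    simp only [rfgt]
    by_cases h : a < b <;> (simp [h, ih]; try omega)

theorem rfgt_sorted_eq (l : List Int) (a : Int) (hs : l.Pairwise (· ≤ ·)) (k : Nat)
    (hk : k < l.length) (hlt : ∀ j (hj : j < l.length), j < k → l[j] ≤ a) (hgt : a < l[k]) :
    rfgt l a = some (l.eraseIdx k) := by
  induction l generalizing k with
  | nil => simp at hk
  | cons b t ih =>
    by_cases hab : a < b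
    · have hk0 : k = 0 := by
        by_contra h0
        have : (b :: t)[0]'(by simp) ≤ a := hlt 0 (by simp) (by omega)
        simp at this; omega
      subst hk0
      simp [rfgt, hab]
    · have hk0 : k ≠ 0 := by
        intro h0; subst h0; simp at hgt; omega
      obtain ⟨k', rfl⟩ : ∃ k', k = k' + 1 := ⟨k - 1, by omega⟩
      have ih' := ih (List.pairwise_cons.mp hs).2 k' (by simpa using hk)
        (fun j hj hjk => hlt (j + 1) (by simpa using hj) (by omega))
        (by simpa using hgt)
      simp [rfgt, hab, ih', List.eraseIdx_cons_succ]

theorem rfgt_sublist (l : List Int) (a : Int) (t : List Int) (h : rfgt l a = some t) :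
    t.Sublist l := by
  induction l generalizing t with
  | nil => simp [rfgt] at h
  | cons b u ih =>
    simp only [rfgt] at h
    by_cases hab : a < b
    · simp [hab] at h; subst h; exact List.sublist_cons_self b u
    · simp [hab] at h
      obtain ⟨u', hu', rfl⟩ := h
      exact (ih u' hu').cons₂ b

theorem rfgt_sorted_of_some (l : List Int) (a : Int) (t : List Int)
    (hs : l.Pairwise (· ≤ ·)) (h : rfgt l a = some t) : t.Pairwise (· ≤ ·) :=
  hs.sublist (rfgt_sublist l a t h)

theorem stepG_sorted (s : Int × List Int) (a : Int) (hs : s.2.Pairwise (· ≤ ·)) :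
    (stepG s a).2.Pairwise (· ≤ ·) := by
  unfold stepG
  cases h : rfgt s.2 a with
  | none => exact hs
  | some t => exact rfgt_sorted_of_some s.2 a t hs h

theorem stepA_eq_stepG (s : Int × List Int) (a : Int) (hs : s.2.Pairwise (· ≤ ·)) :
    stepA s a = stepG s a := by
  obtain ⟨hle, hlo, hhi⟩ := PySem.List.bisectRight_spec s.2 a hs
  unfold stepA
  by_cases hend : PySem.List.bisectRight s.2 a = s.2.length
  · have hnone : rfgt s.2 a = none := by
      rw [rfgt_none_iff]
      intro b hb
      obtain ⟨j, hj, rfl⟩ := List.mem_iff_getElem.mp hb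
      exact hlo j hj (by omega)
    simp [hend, stepG, hnone]
  · have hklt : PySem.List.bisectRight s.2 a < s.2.length := by omega
    have hgt : a < s.2[PySem.List.bisectRight s.2 a] := hhi _ hklt (le_refl _)
    have hsome : rfgt s.2 a = some (s.2.eraseIdx (PySem.List.bisectRight s.2 a)) :=
      rfgt_sorted_eq s.2 a hs _ hklt (fun j hj hjk => hlo j hj hjk) hgt
    have hpop := PySem.List.pop?_natCast s.2 (PySem.List.bisectRight s.2 a) hklt
    have hcond : a < s.2.getD (PySem.List.bisectRight s.2 a) 0 := by
      rw [List.getD_eq_getElem s.2 0 hklt]; exact hgt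
    simp only [if_neg hend, if_pos hcond, hpop, stepG, hsome]

theorem foldA_eq_foldG (L : List Int) (s : Int × List Int) (hs : s.2.Pairwise (· ≤ ·)) :
    L.foldl stepA s = L.foldl stepG s := by
  induction L generalizing s with
  | nil => rfl
  | cons a L ih =>
    simp only [List.foldl_cons, stepA_eq_stepG s a hs]
    exact ih (stepG s a) (stepG_sorted s a hs)

-- lifting: if b ≤ x, the greedy step on (b :: t) keeps b and acts inside t
theorem stepG_lift (c : Int) (b : Int) (t : List Int) (x : Int) (hbx : b ≤ x) :
    stepG (c, b :: t) x = ((stepG (c, t) x).1, b :: (stepG (c, t) x).2) := by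
  unfold stepG
  simp only [rfgt, not_lt.mpr hbx]
  cases h : rfgt t x <;> simp [h]

theorem rfgt_head_gt (b : Int) (t : List Int) (a : Int)
    (hs : (b :: t).Pairwise (· ≤ ·)) (hab : a < b) :
    rfgt t a = match t with | [] => none | _ :: t' => some t' := by
  cases t with
  | nil => simp [rfgt]
  | cons x t' =>
    have hbx : b ≤ x := (List.pairwise_cons.mp hs).1 x (by simp)
    simp [rfgt, show a < x by omega]

theorem stepG_comm (l : List Int) (hs : l.Pairwise (· ≤ ·)) (c a e : Int) :
    stepG (stepG (c, l) a) e = stepG (stepG (c, l) e) a := by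
  induction l generalizing c with
  | nil => simp [stepG, rfgt]
  | cons b t ih =>
    have hst : t.Pairwise (· ≤ ·) := (List.pairwise_cons.mp hs).2
    by_cases ha : a < b <;> by_cases he : e < b
    · -- both remove the head; the second call sees t whose head (if any) exceeds both
      have h1 : stepG (c, b :: t) a = (c + 1, t) := by simp [stepG, rfgt, ha]
      have h2 : stepG (c, b :: t) e = (c + 1, t) := by simp [stepG, rfgt, he]
      rw [h1, h2]
      have ht1 := rfgt_head_gt b t a hs ha
      have ht2 := rfgt_head_gt b t e hs he
      cases t with
      | nil => rfl
      | cons x t' => simp only [stepG, ht1, ht2]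
    · -- a removes the head, e acts inside t
      have h1 : stepG (c, b :: t) a = (c + 1, t) := by simp [stepG, rfgt, ha]
      rw [h1, stepG_lift c b t e (by omega)]
      cases h : rfgt t e with
      | none =>
        simp [stepG, h, rfgt, ha]
      | some u =>
        have h2 : stepG (c, t) e = (c + 1, u) := by simp [stepG, h]
        simp only [h2]
        have h3 : stepG (c + 1, t) e = (c + 1 + 1, u) := by simp [stepG, h]
        have h4 : stepG (c + 1, b :: u) a = (c + 1 + 1, u) := by simp [stepG, rfgt, ha]
        rw [h3, h4]
    · -- symmetric to the previous case
      have h1 : stepG (c, b :: t) e = (c + 1, t) := by simp [stepG, rfgt, he]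
      rw [h1, stepG_lift c b t a (by omega)]
      cases h : rfgt t a with
      | none =>
        simp [stepG, h, rfgt, he]
      | some u =>
        have h2 : stepG (c, t) a = (c + 1, u) := by simp [stepG, h]
        simp only [h2]
        have h3 : stepG (c + 1, t) a = (c + 1 + 1, u) := by simp [stepG, h]
        have h4 : stepG (c + 1, b :: u) e = (c + 1 + 1, u) := by simp [stepG, rfgt, he]
        rw [h3, h4]
    · -- both act inside t: lift twice and use the induction hypothesis
      rw [stepG_lift c b t a (by omega)]
      rw [stepG_lift c b t e (by omega)]
      rw [stepG_lift _ b _ e (by omega), stepG_lift _ b _ a (by omega)]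
      rw [ih hst c]
theorem fold_perm (A1 A2 : List Int) (hp : A1.Perm A2) :
    ∀ s : Int × List Int, s.2.Pairwise (· ≤ ·) → A1.foldl stepG s = A2.foldl stepG s := by
  induction hp with
  | nil => intro s _; rfl
  | cons x _ ih =>
    intro s hs
    simp only [List.foldl_cons]
    exact ih (stepG s x) (stepG_sorted s x hs)
  | swap x y l =>
    intro s hs
    simp only [List.foldl_cons]
    rw [show stepG (stepG s y) x = stepG (stepG s x) y from stepG_comm s.2 hs s.1 y x]
  | trans _ _ ih1 ih2 =>
    intro s hs
    rw [ih1 s hs, ih2 s hs]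

-- the two-pointer count, as a recursion on the two sorted lists
def countTP : List Int → List Int → Int
  | [], _ => 0
  | _ :: _, [] => 0
  | a :: A, b :: B => if a < b then 1 + countTP A B else countTP (a :: A) B

theorem foldG_nil_snd (L : List Int) (c : Int) : L.foldl stepG (c, []) = (c, []) := by
  induction L generalizing c with
  | nil => rfl
  | cons a L ih => simpa [stepG, rfgt] using ih c

theorem fold_lift (L : List Int) (b : Int) (hb : ∀ x ∈ L, b ≤ x) (c : Int) (t : List Int) :
    L.foldl stepG (c, b :: t) =
      ((L.foldl stepG (c, t)).1, b :: (L.foldl stepG (c, t)).2) := by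
  induction L generalizing c t with
  | nil => rfl
  | cons x L ih =>
    simp only [List.foldl_cons]
    rw [stepG_lift c b t x (hb x (by simp))]
    exact ih (fun y hy => hb y (by simp [hy])) _ _

theorem sorted_count (B A : List Int) (c : Int)
    (hA : A.Pairwise (· ≤ ·)) (hB : B.Pairwise (· ≤ ·)) :
    (A.foldl stepG (c, B)).1 = c + countTP A B := by
  induction B generalizing A c with
  | nil =>
    cases A with
    | nil => simp [countTP]
    | cons a A' =>
      have h0 : stepG (c, []) a = (c, []) := by simp [stepG, rfgt]
      simp only [List.foldl_cons, h0, foldG_nil_snd, countTP]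
      omega
  | cons b B' ih =>
    cases A with
    | nil => simp [countTP]
    | cons a A' =>
      obtain ⟨hba, hA'⟩ := List.pairwise_cons.mp hA
      obtain ⟨hbB, hB'⟩ := List.pairwise_cons.mp hB
      by_cases hab : a < b
      · have h1 : stepG (c, b :: B') a = (c + 1, B') := by simp [stepG, rfgt, hab]
        simp only [List.foldl_cons, h1, countTP, if_pos hab]
        rw [ih A' (c + 1) hA' hB']
        ring
      · have hle : b ≤ a := by omega
        have hbL : ∀ x ∈ a :: A', b ≤ x := by
          intro x hx
          rcases List.mem_cons.mp hx with rfl | hx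
          · exact hle
          · exact le_trans hle (hba x hx)
        rw [fold_lift (a :: A') b hbL c B']
        simp only [countTP, if_neg hab]
        exact ih (a :: A') c hA hB'

theorem altLoop_eq (sa sb : List Int) (ans : Int) (i j : Nat) :
    altLoop sa sb ans i j = ans + countTP (sa.drop i) (sb.drop j) := by
  fun_induction altLoop with
  | case1 ans i j h hlt ih =>
    rw [ih, List.drop_eq_getElem_cons h.1, List.drop_eq_getElem_cons h.2]
    simp only [countTP, if_pos hlt]
    ring
  | case2 ans i j h hlt ih =>
    rw [ih, List.drop_eq_getElem_cons h.1, List.drop_eq_getElem_cons h.2]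
    simp only [countTP, if_neg hlt]
  | case3 ans i j h =>
    rcases not_and_or.mp h with h1 | h1
    · rw [List.drop_eq_nil_of_le (as := sa) (by omega)]
      cases hd : sb.drop j with
      | nil => simp [countTP]
      | cons x t => simp [countTP]
    · rw [List.drop_eq_nil_of_le (as := sb) (by omega)]
      cases hd : sa.drop i with
      | nil => simp [countTP]
      | cons x t => simp [countTP]

theorem sorted_pairwise_id (l : List Int) :
    (PySem.List.sorted l (fun x => x)).Pairwise (· ≤ ·) := by
  simpa using PySem.List.sorted_pairwise l (fun x => x)

-- ===== VERDICT (by name: the statement is the Claim_ definition above) =====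
theorem solution_spec : Claim_equal_solution := by
  intro A B _
  unfold Spec_solution solution solution_alt
  rw [foldA_eq_foldG A _ (sorted_pairwise_id B)]
  rw [fold_perm A (PySem.List.sorted A (fun x => x))
        ((PySem.List.sorted_perm A (fun x => x) false).symm) _ (sorted_pairwise_id B)]
  rw [sorted_count _ _ 0 (sorted_pairwise_id A) (sorted_pairwise_id B)]
  rw [altLoop_eq]
  simp
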